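-- pv_equiv track=rewrite | github.com/guswns3371/Algorithm | src/프로그래머스/lv1/17681. ［1차］ 비밀지도/［1차］ 비밀지도.py | solution
-- ===== SOURCE A (Python) =====
-- def solution(n, arr1, arr2):
--     graph = []
--     dmap = {"1": "#", "0": " "}
--     for i in range(n):
--         a1 = arr1[i]
--         a2 = arr2[i]
--         binary = bin(a1 | a2)[2:]
--         binary = binary.rjust(n, "0")
--         graph.append("".join(dmap[x] for x in binary))
--
--     return graph
-- ===== SOURCE B (Python) =====
-- def solution(n, arr1, arr2):
--     graph = []
--     for i in range(n):
--         v = arr1[i] | arr2[i]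
--         w, chars = n, []
--         while v or w > 0:
--             chars.append('#' if v & 1 else ' ')
--             v >>= 1
--             w -= 1
--         graph.append(''.join(reversed(chars)))
--     return graph
-- ===== Notes on version B (the rewrite author's own statement) =====
-- stated objective: simpler
-- what changed: A stages each row through bin() formatting, a slice, rjust padding and a dict translation of each character; B builds the row in one merged LSB-first loop that appends '#'/' ' from the bit v&1, halves v and counts the pad width down, then reverses once -- no intermediate binary string, no rjust, no dict.
import Mathlib
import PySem

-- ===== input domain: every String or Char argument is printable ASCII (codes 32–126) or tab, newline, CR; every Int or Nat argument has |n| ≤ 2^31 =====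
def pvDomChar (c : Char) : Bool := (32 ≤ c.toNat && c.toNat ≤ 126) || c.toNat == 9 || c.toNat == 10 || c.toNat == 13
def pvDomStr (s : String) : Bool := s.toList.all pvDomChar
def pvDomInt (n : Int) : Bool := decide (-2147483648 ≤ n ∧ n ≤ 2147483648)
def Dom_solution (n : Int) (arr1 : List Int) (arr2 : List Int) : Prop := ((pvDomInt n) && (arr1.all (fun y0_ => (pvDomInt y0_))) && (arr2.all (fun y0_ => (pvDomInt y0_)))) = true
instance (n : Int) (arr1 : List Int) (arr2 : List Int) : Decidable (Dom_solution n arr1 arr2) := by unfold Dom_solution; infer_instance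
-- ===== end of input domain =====

-- B builds each row in ONE merged LSB-first loop (append the bit character v&1, halve, count the
-- pad width down) and one final reverse, replacing A's staged bin()/slice/rjust/dict pipeline (objective: simpler); return
-- values proved equal on Pre_.

-- ===== PORT A =====
-- Python str.rjust(w, c): pad on the left with c up to width w (exact).
def pyRJust (cs : List Char) (w : Nat) (c : Char) : List Char :=
  List.replicate (w - cs.length) c ++ cs

-- dmap = {"1": "#", "0": " "}
def dmapA : PySem.Dict Char Char := (PySem.Dict.empty.insert '1' '#').insert '0' ' '

-- one loop body of A: bin(a1|a2)[2:], rjust(n,'0'), ''.join(dmap[x] …)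
-- (dmap[x] would be a KeyError for a char outside {'0','1'} — those inputs are outside Pre_;
--  the port returns '?' there instead of raising)
def rowA (n : Int) (v : Int) : String :=
  let binary := (PySem.Int.pyBin v).toList.drop 2
  let binary := pyRJust binary n.toNat '0'
  String.ofList (binary.map (fun x => (dmapA.get? x).getD '?'))

def solution (n : Int) (arr1 : List Int) (arr2 : List Int) : List String :=
  (PySem.List.pyRange 0 n 1).foldl
    (fun graph i =>
      graph ++ [rowA n (Int.lor (PySem.List.pyGetD arr1 i 0) (PySem.List.pyGetD arr2 i 0))])
    []

-- ===== PORT B =====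
-- while v or w > 0: chars.append('#' if v & 1 else ' '); v >>= 1; w -= 1
-- (Source B's v is nonnegative on every input inside Pre_; the port reads it as a Nat via .toNat,
--  exact for v ≥ 0 — for negative v the Python loop would not terminate, outside Pre_)
def rowLoop (v : Nat) (w : Int) (chars : List Char) : List Char :=
  if v ≠ 0 ∨ 0 < w then
    rowLoop (v >>> 1) (w - 1) (chars ++ [if v &&& 1 = 1 then '#' else ' '])
  else chars
termination_by v + w.toNat
decreasing_by
  rename_i h
  rw [Nat.shiftRight_one]
  rcases h with h | h
  · have := Nat.div_lt_self (Nat.pos_of_ne_zero h) one_lt_two; omega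
  · omega

-- ''.join(reversed(chars))
def rowB (n : Int) (v : Int) : String :=
  String.ofList (rowLoop v.toNat n []).reverse

def solution_alt (n : Int) (arr1 : List Int) (arr2 : List Int) : List String :=
  (PySem.List.pyRange 0 n 1).foldl
    (fun graph i =>
      graph ++ [rowB n (Int.lor (PySem.List.pyGetD arr1 i 0) (PySem.List.pyGetD arr2 i 0))])
    []

-- ===== PRECONDITION & SPEC =====
-- A raises IndexError when either list is shorter than n, and KeyError (dmap['b'] / dmap['-'])
-- when some of the first n values is negative (bin() then emits '-'/'b'); Pre_ excludes exactly those.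
def Pre_solution (n : Int) (arr1 : List Int) (arr2 : List Int) : Prop :=
  n.toNat ≤ arr1.length ∧ n.toNat ≤ arr2.length ∧
  (∀ x ∈ arr1.take n.toNat, 0 ≤ x) ∧ (∀ x ∈ arr2.take n.toNat, 0 ≤ x)
instance (n : Int) (arr1 : List Int) (arr2 : List Int) : Decidable (Pre_solution n arr1 arr2) := by
  unfold Pre_solution; infer_instance

def pvWitness_solution : Int × List Int × List Int := (3, [4, 2, 7], [5, 0, 1])

def Spec_solution (n : Int) (arr1 : List Int) (arr2 : List Int) (out : List String) : Prop :=
  out = solution_alt n arr1 arr2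
instance (n : Int) (arr1 : List Int) (arr2 : List Int) (out : List String) : Decidable (Spec_solution n arr1 arr2 out) := by
  unfold Spec_solution; infer_instance

-- ===== CLAIM (what is proved, stated in full; the proofs are below) =====
def Claim_equal_solution : Prop := ∀ (n : Int) (arr1 : List Int) (arr2 : List Int), Dom_solution n arr1 arr2 → Pre_solution n arr1 arr2 → Spec_solution n arr1 arr2 (solution n arr1 arr2)

-- ===== LEMMAS AND PROOFS =====

-- spec-level form of Nat.toDigits 2 (most significant digit first)
def binA (v : Nat) : List Char :=
  if h : v / 2 = 0 then [Nat.digitChar (v % 2)]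
  else binA (v / 2) ++ [Nat.digitChar (v % 2)]
decreasing_by exact Nat.div_lt_self (by omega) (by omega)

theorem toDigitsCore_eq_binA (f : Nat) : ∀ (v : Nat) (acc : List Char), v < 2 ^ f → 0 < f →
    Nat.toDigitsCore 2 f v acc = binA v ++ acc := by
  induction f with
  | zero => intro v acc h hf; omega
  | succ f ih =>
    intro v acc h _
    rw [Nat.toDigitsCore]
    by_cases h2 : v / 2 = 0
    · simp [h2, binA]
    · have hf : 0 < f := by
        by_contra hc
        have : f = 0 := by omega
        subst this
        omega
      rw [if_neg h2, ih (v / 2) _ (by rw [pow_succ] at h; omega) hf]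
      conv_rhs => rw [binA]
      simp [h2]

theorem toDigits_eq_binA (v : Nat) : Nat.toDigits 2 v = binA v := by
  have : Nat.toDigits 2 v = Nat.toDigitsCore 2 (v + 1) v [] := rfl
  rw [this, toDigitsCore_eq_binA (v + 1) v []
    (lt_of_lt_of_le Nat.lt_two_pow_self (Nat.pow_le_pow_right (by omega) (by omega))) (by omega),
    List.append_nil]

theorem binA_mem (v : Nat) : ∀ c ∈ binA v, c = '0' ∨ c = '1' := by
  induction v using Nat.strong_induction_on with
  | _ v ih =>
    intro c hc
    rw [binA] at hc
    have hmod := Nat.mod_two_eq_zero_or_one v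
    split at hc
    · simp at hc; rcases hmod with h | h <;> rw [h] at hc <;> simp [hc, Nat.digitChar]
    · rename_i h2
      rcases List.mem_append.mp hc with h | h
      · exact ih (v / 2) (Nat.div_lt_self (by omega) (by omega)) c h
      · simp at h; rcases hmod with hm | hm <;> rw [hm] at h <;> simp [h, Nat.digitChar]

-- dict translation equals the plain bit test character
theorem dmapA_get (c : Char) (hc : c = '0' ∨ c = '1') :
    ((dmapA.get? c).getD '?') = (if c = '1' then '#' else ' ') := by
  rcases hc with h | h <;> subst h <;> decide

-- the exhausted loop only appends the pad, counting w down
theorem rowLoop_zero (w : Int) (chars : List Char) :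
    rowLoop 0 w chars = chars ++ List.replicate w.toNat ' ' := by
  by_cases hw : 0 < w
  · rw [rowLoop, if_pos (Or.inr hw)]
    norm_num
    rw [rowLoop_zero (w - 1) (chars ++ [' '])]
    rw [show w.toNat = (w - 1).toNat + 1 by omega, List.replicate_succ]
    simp
  · rw [rowLoop, if_neg (by simp [hw]), show w.toNat = 0 by omega]
    simp
termination_by w.toNat
decreasing_by omega

-- loop invariant: for m ≠ 0 the loop appends m's binary digits ('#'/' ') LSB first,
-- then the pad of blanks counted down from w
theorem rowLoop_spec (m : Nat) : ∀ (w : Int) (chars : List Char), m ≠ 0 →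
    rowLoop m w chars = chars
      ++ ((binA m).map (fun c => if c = '1' then '#' else ' ')).reverse
      ++ List.replicate (w.toNat - (binA m).length) ' ' := by
  induction m using Nat.strong_induction_on with
  | _ m ih =>
    intro w chars hm
    rw [rowLoop, if_pos (Or.inl hm), Nat.shiftRight_one, Nat.and_one_is_mod]
    have hmod := Nat.mod_two_eq_zero_or_one m
    by_cases h2 : m / 2 = 0
    · have hm1 : m = 1 := by omega
      subst hm1
      rw [h2]
      norm_num
      rw [rowLoop_zero]
      rw [binA, dif_pos (by norm_num)]
      simp [Nat.digitChar]
      try omega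
    · rw [ih (m / 2) (Nat.div_lt_self (by omega) (by omega)) (w - 1) _ h2]
      conv_rhs => rw [binA, dif_neg h2]
      rcases hmod with hmm | hmm <;> rw [hmm] <;> simp [Nat.digitChar] <;> try omega

-- the two row builders agree for 1 ≤ n and v ≥ 0
theorem row_eq (n : Int) (hn : 1 ≤ n) (v : Int) (hv : 0 ≤ v) : rowA n v = rowB n v := by
  obtain ⟨m, rfl⟩ := Int.eq_ofNat_of_zero_le hv
  simp only [rowA, rowB]
  have hdrop : (PySem.Int.pyBin (m : Int)).toList.drop 2 = binA m := by
    rw [PySem.Int.toList_pyBin]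
    unfold PySem.Int.toBinChars0b
    rw [if_neg (by omega)]
    simp [toDigits_eq_binA]
  rw [hdrop, Int.toNat_natCast]
  unfold pyRJust
  rw [List.map_append, List.map_replicate]
  have hpadc : ((dmapA.get? '0').getD '?') = ' ' := by decide
  rw [hpadc]
  have hmapeq : (binA m).map (fun x => (dmapA.get? x).getD '?')
      = (binA m).map (fun c => if c = '1' then '#' else ' ') :=
    List.map_congr_left (fun c hc => dmapA_get c (binA_mem m c hc))
  rw [hmapeq]
  by_cases hm : m = 0
  · subst hm
    rw [rowLoop_zero]
    rw [binA, dif_pos (by norm_num)]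
    simp [Nat.digitChar]
    rw [show n.toNat = (n.toNat - 1) + 1 from by omega, List.replicate_succ']
    simp
  · rw [rowLoop_spec m n [] hm]
    simp

theorem lor_nonneg_int (a b : Int) (ha : 0 ≤ a) (hb : 0 ≤ b) : 0 ≤ Int.lor a b := by
  obtain ⟨a', rfl⟩ := Int.eq_ofNat_of_zero_le ha
  obtain ⟨b', rfl⟩ := Int.eq_ofNat_of_zero_le hb
  exact Int.natCast_nonneg _

-- ===== VERDICT (by name: the statement is the Claim_ definition above) =====
theorem solution_spec : Claim_equal_solution := by
  intro n arr1 arr2 _ hpre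
  obtain ⟨h1, h2, h3, h4⟩ := hpre
  unfold Spec_solution solution solution_alt
  rw [PySem.List.foldl_append_singleton_eq_map, PySem.List.foldl_append_singleton_eq_map]
  simp only [List.nil_append]
  apply List.map_congr_left
  intro i hi
  rw [PySem.List.mem_pyRange_one] at hi
  obtain ⟨hi0, hin⟩ := hi
  have hi1 : i.toNat < arr1.length := by omega
  have hi2 : i.toNat < arr2.length := by omega
  have ha1 : 0 ≤ arr1[i.toNat] := h3 _ (List.mem_take_iff_getElem.mpr ⟨i.toNat, by omega, by simp⟩)
  have ha2 : 0 ≤ arr2[i.toNat] := h4 _ (List.mem_take_iff_getElem.mpr ⟨i.toNat, by omega, by simp⟩)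
  rw [PySem.List.pyGetD_eq_getElem arr1 0 hi0 (by omega),
      PySem.List.pyGetD_eq_getElem arr2 0 hi0 (by omega)]
  exact row_eq n (by omega) _ (lor_nonneg_int _ _ ha1 ha2)
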